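-- pv_equiv track=rewrite | github.com/GalenWQ/CS321OshaProject | k_means.py | eval_cluster
-- ===== SOURCE A (Python) =====
-- def eval_cluster(cluster):
--     safe = 0
--     compliant = 0
--     noncompliant = 0
--
--     for item in cluster:
--         if item[4] == 'Safe':
--             safe += 1
--         elif item[4] == 'Compliant':
--             compliant += 1
--         elif item[4] == 'NonCompliant':
--             noncompliant += 1
--
--     return safe, compliant, noncompliant
-- ===== SOURCE B (Python) =====
-- def eval_cluster(cluster):
--     labels = [item[4] for item in cluster]
--     return labels.count('Safe'), labels.count('Compliant'), labels.count('NonCompliant')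
-- ===== Notes on version B (the rewrite author's own statement) =====
-- stated objective: simpler
-- what changed: Replaces the single branching loop with three counters by extracting the label column once and making three independent list.count passes, one per label.
import Mathlib
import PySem

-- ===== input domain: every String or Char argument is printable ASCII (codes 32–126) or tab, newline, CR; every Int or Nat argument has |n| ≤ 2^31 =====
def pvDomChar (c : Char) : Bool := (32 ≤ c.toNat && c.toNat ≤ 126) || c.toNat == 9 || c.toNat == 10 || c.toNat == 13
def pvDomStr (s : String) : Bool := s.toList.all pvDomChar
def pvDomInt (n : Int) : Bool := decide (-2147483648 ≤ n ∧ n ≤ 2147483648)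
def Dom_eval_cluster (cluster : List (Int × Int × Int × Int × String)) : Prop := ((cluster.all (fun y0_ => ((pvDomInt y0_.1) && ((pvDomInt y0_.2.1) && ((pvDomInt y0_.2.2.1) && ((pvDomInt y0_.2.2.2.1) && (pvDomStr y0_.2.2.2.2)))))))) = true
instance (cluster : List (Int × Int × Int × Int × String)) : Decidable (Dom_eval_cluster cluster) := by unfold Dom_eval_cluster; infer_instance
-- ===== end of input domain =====

-- B extracts the label column once and makes three independent list.count passes, one per label, instead of A's single branching loop with three running counters (simpler).

-- ===== PORT A =====
def eval_cluster (cluster : List (Int × Int × Int × Int × String)) : Int × Int × Int :=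
  let st := cluster.foldl
    (fun (acc : Int × Int × Int) item =>
      if item.2.2.2.2 = "Safe" then (acc.1 + 1, acc.2.1, acc.2.2)
      else if item.2.2.2.2 = "Compliant" then (acc.1, acc.2.1 + 1, acc.2.2)
      else if item.2.2.2.2 = "NonCompliant" then (acc.1, acc.2.1, acc.2.2 + 1)
      else acc)
    (0, 0, 0)
  st

-- ===== PORT B =====
def eval_cluster_alt (cluster : List (Int × Int × Int × Int × String)) : Int × Int × Int :=
  let labels := cluster.map (fun item => item.2.2.2.2)
  (PySem.List.count labels "Safe", PySem.List.count labels "Compliant", PySem.List.count labels "NonCompliant")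

-- ===== PRECONDITION & SPEC =====
def Spec_eval_cluster (cluster : List (Int × Int × Int × Int × String)) (out : Int × Int × Int) : Prop := out = eval_cluster_alt cluster
instance (cluster : List (Int × Int × Int × Int × String)) (out : Int × Int × Int) : Decidable (Spec_eval_cluster cluster out) := by unfold Spec_eval_cluster; infer_instance

-- ===== CLAIM =====
def Claim_equal_eval_cluster : Prop := ∀ (cluster : List (Int × Int × Int × Int × String)), Dom_eval_cluster cluster → Spec_eval_cluster cluster (eval_cluster cluster)

-- ===== LEMMAS AND PROOFS =====

-- A's loop, started from any accumulator, adds the label counts componentwise.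
theorem eval_cluster_foldl (cluster : List (Int × Int × Int × Int × String))
    (s c n : Int) :
    cluster.foldl
      (fun (acc : Int × Int × Int) item =>
        if item.2.2.2.2 = "Safe" then (acc.1 + 1, acc.2.1, acc.2.2)
        else if item.2.2.2.2 = "Compliant" then (acc.1, acc.2.1 + 1, acc.2.2)
        else if item.2.2.2.2 = "NonCompliant" then (acc.1, acc.2.1, acc.2.2 + 1)
        else acc)
      (s, c, n)
    = (s + ((cluster.map (fun item => item.2.2.2.2)).count "Safe" : Int),
       c + ((cluster.map (fun item => item.2.2.2.2)).count "Compliant" : Int),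
       n + ((cluster.map (fun item => item.2.2.2.2)).count "NonCompliant" : Int)) := by
  induction cluster generalizing s c n with
  | nil => simp
  | cons hd tl ih =>
    simp only [List.foldl_cons, List.map_cons]
    by_cases h1 : hd.2.2.2.2 = "Safe"
    · simp [h1, ih]
      ring
    · by_cases h2 : hd.2.2.2.2 = "Compliant"
      · simp [h2, ih]
        ring
      · by_cases h3 : hd.2.2.2.2 = "NonCompliant"
        · simp [h3, ih]
          ring
        · simp [h1, h2, h3, ih]

-- ===== VERDICT =====
theorem eval_cluster_spec : Claim_equal_eval_cluster := by
  intro cluster _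
  unfold Spec_eval_cluster eval_cluster eval_cluster_alt
  rw [eval_cluster_foldl]
  simp [PySem.List.count]
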